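-- pv_equiv track=rewrite | github.com/jclements3/spurgeon | scripts/extract_sermons.py | strip_promo_block
-- ===== SOURCE A (Python) =====
-- PROMO_MARKERS = [
--     "Adapted from The C. H. Spurgeon Collection",
--     "PRAY THE HOLY SPIRIT",
--     "www.spurgeongems.org",
--     "C. H. Spurgeon sermons in Modern English",
--     "Spanish translations",
--     "By the grace of God",
--     "WILL USE THIS SERMON",
--     "TO BRING MANY TO A SAVING KNOWLEDGE",
-- ]
--
-- def is_promo_line(line):
--     """Check if a line belongs to the trailing promo block."""
--     stripped = line.strip()
--     if not stripped:
--         return False  # blank lines between promo lines handled by context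
--     for marker in PROMO_MARKERS:
--         if marker.lower() in stripped.lower():
--             return True
--     return False
--
-- def strip_promo_block(lines):
--     """Remove the trailing promo/ad block from the last page."""
--     # Walk backwards to find where the promo starts
--     # Once we hit the first promo line going backwards, keep removing until
--     # we find real content.
--     end = len(lines)
--     # First, trim trailing blank lines
--     while end > 0 and not lines[end - 1].strip():
--         end -= 1
--
--     # Walk backwards removing promo lines and blanks between them
--     while end > 0:
--         stripped = lines[end - 1].strip()
--         if not stripped or is_promo_line(lines[end - 1]):
--             end -= 1
--         else:
--             break
--
--     return lines[:end]
-- ===== SOURCE B (Python) =====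
-- PROMO_MARKERS = [
--     "Adapted from The C. H. Spurgeon Collection",
--     "PRAY THE HOLY SPIRIT",
--     "www.spurgeongems.org",
--     "C. H. Spurgeon sermons in Modern English",
--     "Spanish translations",
--     "By the grace of God",
--     "WILL USE THIS SERMON",
--     "TO BRING MANY TO A SAVING KNOWLEDGE",
-- ]
--
-- def is_promo_line(line):
--     """Check if a line belongs to the trailing promo block."""
--     stripped = line.strip()
--     if not stripped:
--         return False
--     for marker in PROMO_MARKERS:
--         if marker.lower() in stripped.lower():
--             return True
--     return False
--
-- def strip_promo_block(lines):
--     """Remove the trailing promo/ad block: keep everything up to the last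
--     line that is real content (non-blank and not a promo line)."""
--     last = -1
--     for i, line in enumerate(lines):
--         if line.strip() and not is_promo_line(line):
--             last = i
--     return lines[:last + 1]
-- ===== Notes on version B (the rewrite author's own statement) =====
-- stated objective: simpler
-- what changed: Replaces A's two backward while-loop trims from the end with a single forward pass that records the index of the last non-blank non-promo line and returns the prefix up to it.
import Mathlib
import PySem

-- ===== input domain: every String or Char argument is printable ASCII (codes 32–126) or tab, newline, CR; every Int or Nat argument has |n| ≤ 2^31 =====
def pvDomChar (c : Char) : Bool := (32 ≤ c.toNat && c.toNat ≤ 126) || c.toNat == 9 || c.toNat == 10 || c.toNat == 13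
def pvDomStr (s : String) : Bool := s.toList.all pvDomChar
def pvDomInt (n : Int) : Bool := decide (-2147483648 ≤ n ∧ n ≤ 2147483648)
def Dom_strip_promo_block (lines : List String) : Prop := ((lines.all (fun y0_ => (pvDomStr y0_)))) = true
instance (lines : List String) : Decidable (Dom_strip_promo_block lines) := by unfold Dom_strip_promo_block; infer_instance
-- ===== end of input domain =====

-- B replaces A's two backward while-loop trims with one forward pass that records the
-- index of the last real-content line (objective: simpler).

-- ===== PORT A =====
def PROMO_MARKERS : List String := [
  "Adapted from The C. H. Spurgeon Collection",
  "PRAY THE HOLY SPIRIT",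
  "www.spurgeongems.org",
  "C. H. Spurgeon sermons in Modern English",
  "Spanish translations",
  "By the grace of God",
  "WILL USE THIS SERMON",
  "TO BRING MANY TO A SAVING KNOWLEDGE"
]

def is_promo_line (line : String) : Bool :=
  let stripped := PySem.Str.strip line
  if stripped = "" then false
  else PROMO_MARKERS.any (fun marker =>
    PySem.Str.isIn (PySem.Str.lower marker) (PySem.Str.lower stripped))

-- first while loop of A: while end > 0 and not lines[end-1].strip(): end -= 1
def trimBlanksA (lines : List String) : Nat → Nat
  | 0 => 0
  | e + 1 =>
    if PySem.Str.strip (lines.getD e "") = "" then trimBlanksA lines e else e + 1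

-- second while loop of A: while end > 0 and (blank or promo): end -= 1 / break
def trimPromoA (lines : List String) : Nat → Nat
  | 0 => 0
  | e + 1 =>
    if PySem.Str.strip (lines.getD e "") = "" ∨ is_promo_line (lines.getD e "") = true then
      trimPromoA lines e
    else e + 1

def strip_promo_block (lines : List String) : List String :=
  PySem.List.slice lines none
    (some ((trimPromoA lines (trimBlanksA lines lines.length) : Nat) : Int))

-- ===== PORT B =====
def strip_promo_block_alt (lines : List String) : List String :=
  let last := (PySem.List.enumerate lines 0).foldl
    (fun acc p =>
      if PySem.Str.strip p.2 ≠ "" ∧ is_promo_line p.2 = false then p.1 else acc)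
    (-1 : Int)
  PySem.List.slice lines none (some (last + 1))

-- ===== PRECONDITION & SPEC =====
def Spec_strip_promo_block (lines : List String) (out : List String) : Prop := out = strip_promo_block_alt lines
instance (lines : List String) (out : List String) : Decidable (Spec_strip_promo_block lines out) := by unfold Spec_strip_promo_block; infer_instance

-- ===== CLAIM (what is proved, stated in full; the proofs are below) =====
def Claim_equal_strip_promo_block : Prop := ∀ (lines : List String), Dom_strip_promo_block lines → Spec_strip_promo_block lines (strip_promo_block lines)

-- ===== LEMMAS AND PROOFS =====

-- A's blank-trimming pre-pass is absorbed by the second loop (blank is one of its disjuncts).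
theorem trimPromoA_trimBlanksA (lines : List String) (e : Nat) :
    trimPromoA lines (trimBlanksA lines e) = trimPromoA lines e := by
  induction e with
  | zero => rfl
  | succ e ih =>
    by_cases h : PySem.Str.strip (lines[e]?.getD "") = ""
    · simp only [trimBlanksA, trimPromoA, List.getD_eq_getElem?_getD, if_pos h,
        if_pos (Or.inl h)]
      exact ih
    · simp [trimBlanksA, h]

-- A's backward trim over the first e lines computes B's last-content-index fold, plus one.
theorem trimPromoA_eq_fold (lines : List String) (e : Nat) (he : e ≤ lines.length) :
    ((trimPromoA lines e : Nat) : Int) =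
      (PySem.List.enumerate (lines.take e) 0).foldl
        (fun acc p =>
          if PySem.Str.strip p.2 ≠ "" ∧ is_promo_line p.2 = false then p.1 else acc)
        (-1 : Int) + 1 := by
  induction e with
  | zero => simp [trimPromoA]
  | succ e ih =>
    have hlt : e < lines.length := he
    have htake : lines.take (e + 1) = lines.take e ++ [lines[e]] := by
      rw [List.take_add_one, List.getElem?_eq_getElem hlt]; rfl
    have hget : lines[e]?.getD "" = lines[e] := by
      rw [List.getElem?_eq_getElem hlt]; rfl
    rw [htake, PySem.List.enumerate_append, List.foldl_append]
    have hlen : (lines.take e).length = e := List.length_take_of_le (Nat.le_of_lt hlt)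
    simp only [PySem.List.enumerate, hlen]
    by_cases h : PySem.Str.strip lines[e] = "" ∨ is_promo_line lines[e] = true
    · have hcond : ¬ (PySem.Str.strip lines[e] ≠ "" ∧ is_promo_line lines[e] = false) := by
        rcases h with h | h <;> simp [h]
      simp only [List.foldl_cons, List.foldl_nil, if_neg hcond]
      rw [show trimPromoA lines (e + 1) = trimPromoA lines e by
        simp only [trimPromoA, List.getD_eq_getElem?_getD, hget, if_pos h]]
      exact ih (Nat.le_of_lt hlt)
    · push Not at h
      have hcond : PySem.Str.strip lines[e] ≠ "" ∧ is_promo_line lines[e] = false := by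
        refine ⟨h.1, ?_⟩
        cases hb : is_promo_line lines[e] with
        | false => rfl
        | true => exact absurd hb h.2
      simp only [List.foldl_cons, List.foldl_nil, if_pos hcond]
      have hno : ¬ (PySem.Str.strip lines[e] = "" ∨ is_promo_line lines[e] = true) := by
        simp [hcond.1, hcond.2]
      rw [show trimPromoA lines (e + 1) = e + 1 by
        simp only [trimPromoA, List.getD_eq_getElem?_getD, hget, if_neg hno]]
      push_cast; ring

-- ===== VERDICT (by name: the statement is the Claim_ definition above) =====
theorem strip_promo_block_spec : Claim_equal_strip_promo_block := by
  intro lines _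
  unfold Spec_strip_promo_block strip_promo_block strip_promo_block_alt
  rw [trimPromoA_trimBlanksA, trimPromoA_eq_fold lines lines.length le_rfl,
    List.take_length]
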